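-- pv_equiv track=rewrite | github.com/rabsef-bicrym/untitled-paranormal-tracker | web/backend/models.py | get_frameworks_for_type
-- ===== SOURCE A (Python) =====
-- FRAMEWORK_CATEGORIES = {
--     "caps": {
--         "name": "Cardiff Anomalous Perceptions Scale",
--         "description": "Psychological framework for evaluating anomalous perceptions",
--         "categories": {
--             "temporal_lobe": ["precognition", "time_slip", "deja_vu"],
--             "clinical_perceptual": ["shadow_person", "ghost", "doppelganger"],
--             "chemosensory": ["phantom_smell", "other"],
--             "sleep_related": ["sleep_paralysis", "obe", "nde"],
--             "external_agent": ["alien_encounter", "possession", "haunting"],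
--         }
--     },
--     "sleep_paralysis": {
--         "name": "Sleep Paralysis Framework",
--         "description": "Categories based on sleep paralysis research",
--         "categories": {
--             "intruder": ["shadow_person", "ghost", "alien_encounter"],
--             "incubus": ["sleep_paralysis", "possession"],
--             "vestibular_motor": ["obe", "nde", "time_slip"],
--         }
--     },
--     "hypnagogic": {
--         "name": "Hypnagogic/Hypnopompic Framework",
--         "description": "Experiences during sleep-wake transitions",
--         "categories": {
--             "visual": ["ghost", "shadow_person", "doppelganger", "ufo"],
--             "auditory": ["ghost", "haunting"],
--             "tactile": ["sleep_paralysis", "possession"],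
--             "proprioceptive": ["obe", "time_slip"],
--         }
--     }
-- }
--
-- def get_frameworks_for_type(story_type: str) -> dict[str, list[str]]:
--     """Get all framework categories that include this story type."""
--     result = {}
--     for framework_key, framework in FRAMEWORK_CATEGORIES.items():
--         matches = []
--         for category, types in framework["categories"].items():
--             if story_type in types:
--                 matches.append(category)
--         if matches:
--             result[framework_key] = matches
--     return result
-- ===== SOURCE B (Python) =====
-- # B: the framework table is a fixed module constant, so the reverse index
-- # (story_type -> {framework_key: [categories...]}) is precomputed as a literal;
-- # each call is a single dict lookup returning fresh copies.
-- REVERSE_INDEX = {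
--     "precognition": {"caps": ["temporal_lobe"]},
--     "time_slip": {"caps": ["temporal_lobe"], "sleep_paralysis": ["vestibular_motor"], "hypnagogic": ["proprioceptive"]},
--     "deja_vu": {"caps": ["temporal_lobe"]},
--     "shadow_person": {"caps": ["clinical_perceptual"], "sleep_paralysis": ["intruder"], "hypnagogic": ["visual"]},
--     "ghost": {"caps": ["clinical_perceptual"], "sleep_paralysis": ["intruder"], "hypnagogic": ["visual", "auditory"]},
--     "doppelganger": {"caps": ["clinical_perceptual"], "hypnagogic": ["visual"]},
--     "phantom_smell": {"caps": ["chemosensory"]},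
--     "other": {"caps": ["chemosensory"]},
--     "sleep_paralysis": {"caps": ["sleep_related"], "sleep_paralysis": ["incubus"], "hypnagogic": ["tactile"]},
--     "obe": {"caps": ["sleep_related"], "sleep_paralysis": ["vestibular_motor"], "hypnagogic": ["proprioceptive"]},
--     "nde": {"caps": ["sleep_related"], "sleep_paralysis": ["vestibular_motor"]},
--     "alien_encounter": {"caps": ["external_agent"], "sleep_paralysis": ["intruder"]},
--     "possession": {"caps": ["external_agent"], "sleep_paralysis": ["incubus"], "hypnagogic": ["tactile"]},
--     "haunting": {"caps": ["external_agent"], "hypnagogic": ["auditory"]},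
--     "ufo": {"hypnagogic": ["visual"]},
-- }
--
--
-- def get_frameworks_for_type(story_type: str) -> dict[str, list[str]]:
--     """Get all framework categories that include this story type."""
--     return {k: list(v) for k, v in REVERSE_INDEX.get(story_type, {}).items()}
-- ===== Notes on version B (the rewrite author's own statement) =====
-- stated objective: idiomatic
-- what changed: Replaces A's per-call nested scan over all frameworks and their categories with a precomputed literal reverse index (story_type -> {framework: [categories]}); each call is a single dict lookup plus a fresh copy.
import Mathlib
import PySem

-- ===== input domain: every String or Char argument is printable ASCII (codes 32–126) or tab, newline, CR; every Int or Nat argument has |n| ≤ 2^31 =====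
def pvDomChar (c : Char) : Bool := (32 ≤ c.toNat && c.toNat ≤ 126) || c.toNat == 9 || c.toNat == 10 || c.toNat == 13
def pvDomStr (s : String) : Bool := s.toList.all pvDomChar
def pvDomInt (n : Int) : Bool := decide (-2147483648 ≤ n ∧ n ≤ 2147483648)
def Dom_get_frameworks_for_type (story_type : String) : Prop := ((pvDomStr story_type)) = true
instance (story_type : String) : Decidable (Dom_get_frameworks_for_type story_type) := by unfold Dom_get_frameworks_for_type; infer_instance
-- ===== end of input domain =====

-- B replaces A's per-call nested scan of the fixed FRAMEWORK_CATEGORIES table by a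
-- precomputed literal reverse index (story_type -> framework -> categories); each call is one lookup.

-- ===== PORT A =====
-- each framework value is (name, description, categories); A only reads .categories (the 3rd component)
def FRAMEWORK_CATEGORIES : PySem.Dict String (String × String × PySem.Dict String (List String)) :=
  PySem.Dict.mk [
    ("caps", ("Cardiff Anomalous Perceptions Scale",
              "Psychological framework for evaluating anomalous perceptions",
              PySem.Dict.mk [
                ("temporal_lobe", ["precognition", "time_slip", "deja_vu"]),
                ("clinical_perceptual", ["shadow_person", "ghost", "doppelganger"]),
                ("chemosensory", ["phantom_smell", "other"]),
                ("sleep_related", ["sleep_paralysis", "obe", "nde"]),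
                ("external_agent", ["alien_encounter", "possession", "haunting"])])),
    ("sleep_paralysis", ("Sleep Paralysis Framework",
              "Categories based on sleep paralysis research",
              PySem.Dict.mk [
                ("intruder", ["shadow_person", "ghost", "alien_encounter"]),
                ("incubus", ["sleep_paralysis", "possession"]),
                ("vestibular_motor", ["obe", "nde", "time_slip"])])),
    ("hypnagogic", ("Hypnagogic/Hypnopompic Framework",
              "Experiences during sleep-wake transitions",
              PySem.Dict.mk [
                ("visual", ["ghost", "shadow_person", "doppelganger", "ufo"]),
                ("auditory", ["ghost", "haunting"]),
                ("tactile", ["sleep_paralysis", "possession"]),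
                ("proprioceptive", ["obe", "time_slip"])]))]

def get_frameworks_for_type (story_type : String) : List (String × List String) :=
  (FRAMEWORK_CATEGORIES.items.foldl (fun result fw =>
    let hits := fw.2.2.2.items.foldl
      (fun ms c => if story_type ∈ c.2 then ms ++ [c.1] else ms) []
    if hits ≠ [] then result.insert fw.1 hits else result) PySem.Dict.empty).items

-- ===== PORT B =====
-- the precomputed literal reverse index from Source B
def REVERSE_INDEX : PySem.Dict String (PySem.Dict String (List String)) :=
  PySem.Dict.mk [
    ("precognition", PySem.Dict.mk [("caps", ["temporal_lobe"])]),
    ("time_slip", PySem.Dict.mk [("caps", ["temporal_lobe"]), ("sleep_paralysis", ["vestibular_motor"]), ("hypnagogic", ["proprioceptive"])]),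
    ("deja_vu", PySem.Dict.mk [("caps", ["temporal_lobe"])]),
    ("shadow_person", PySem.Dict.mk [("caps", ["clinical_perceptual"]), ("sleep_paralysis", ["intruder"]), ("hypnagogic", ["visual"])]),
    ("ghost", PySem.Dict.mk [("caps", ["clinical_perceptual"]), ("sleep_paralysis", ["intruder"]), ("hypnagogic", ["visual", "auditory"])]),
    ("doppelganger", PySem.Dict.mk [("caps", ["clinical_perceptual"]), ("hypnagogic", ["visual"])]),
    ("phantom_smell", PySem.Dict.mk [("caps", ["chemosensory"])]),
    ("other", PySem.Dict.mk [("caps", ["chemosensory"])]),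
    ("sleep_paralysis", PySem.Dict.mk [("caps", ["sleep_related"]), ("sleep_paralysis", ["incubus"]), ("hypnagogic", ["tactile"])]),
    ("obe", PySem.Dict.mk [("caps", ["sleep_related"]), ("sleep_paralysis", ["vestibular_motor"]), ("hypnagogic", ["proprioceptive"])]),
    ("nde", PySem.Dict.mk [("caps", ["sleep_related"]), ("sleep_paralysis", ["vestibular_motor"])]),
    ("alien_encounter", PySem.Dict.mk [("caps", ["external_agent"]), ("sleep_paralysis", ["intruder"])]),
    ("possession", PySem.Dict.mk [("caps", ["external_agent"]), ("sleep_paralysis", ["incubus"]), ("hypnagogic", ["tactile"])]),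
    ("haunting", PySem.Dict.mk [("caps", ["external_agent"]), ("hypnagogic", ["auditory"])]),
    ("ufo", PySem.Dict.mk [("hypnagogic", ["visual"])])]

def get_frameworks_for_type_alt (story_type : String) : List (String × List String) :=
  ((REVERSE_INDEX.getD story_type PySem.Dict.empty).items).map (fun kv => (kv.1, kv.2))

-- ===== PRECONDITION & SPEC =====
def Spec_get_frameworks_for_type (story_type : String) (out : List (String × List String)) : Prop := out = get_frameworks_for_type_alt story_type
instance (story_type : String) (out : List (String × List String)) : Decidable (Spec_get_frameworks_for_type story_type out) := by unfold Spec_get_frameworks_for_type; infer_instance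

-- ===== CLAIM =====
def Claim_equal_get_frameworks_for_type : Prop := ∀ (story_type : String), Dom_get_frameworks_for_type story_type → Spec_get_frameworks_for_type story_type (get_frameworks_for_type story_type)

-- ===== LEMMAS AND PROOFS =====

-- the story types mentioned anywhere in FRAMEWORK_CATEGORIES (= the keys of REVERSE_INDEX)
def pvTypes : List String :=
  ["precognition", "time_slip", "deja_vu", "shadow_person", "ghost", "doppelganger",
   "phantom_smell", "other", "sleep_paralysis", "obe", "nde", "alien_encounter",
   "possession", "haunting", "ufo"]

lemma pv_notin_A (s : String) (h : s ∉ pvTypes) : get_frameworks_for_type s = [] := by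
  simp only [pvTypes, List.mem_cons, List.not_mem_nil, or_false, not_or] at h
  obtain ⟨h1,h2,h3,h4,h5,h6,h7,h8,h9,h10,h11,h12,h13,h14,h15⟩ := h
  simp [get_frameworks_for_type, FRAMEWORK_CATEGORIES,
        h1,h2,h3,h4,h5,h6,h7,h8,h9,h10,h11,h12,h13,h14,h15, PySem.Dict.empty]

lemma pv_notin_B (s : String) (h : s ∉ pvTypes) : get_frameworks_for_type_alt s = [] := by
  simp only [pvTypes, List.mem_cons, List.not_mem_nil, or_false, not_or] at h
  obtain ⟨h1,h2,h3,h4,h5,h6,h7,h8,h9,h10,h11,h12,h13,h14,h15⟩ := h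
  have e1 : ("precognition" == s) = false := beq_eq_false_iff_ne.mpr (Ne.symm h1)
  have e2 : ("time_slip" == s) = false := beq_eq_false_iff_ne.mpr (Ne.symm h2)
  have e3 : ("deja_vu" == s) = false := beq_eq_false_iff_ne.mpr (Ne.symm h3)
  have e4 : ("shadow_person" == s) = false := beq_eq_false_iff_ne.mpr (Ne.symm h4)
  have e5 : ("ghost" == s) = false := beq_eq_false_iff_ne.mpr (Ne.symm h5)
  have e6 : ("doppelganger" == s) = false := beq_eq_false_iff_ne.mpr (Ne.symm h6)
  have e7 : ("phantom_smell" == s) = false := beq_eq_false_iff_ne.mpr (Ne.symm h7)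
  have e8 : ("other" == s) = false := beq_eq_false_iff_ne.mpr (Ne.symm h8)
  have e9 : ("sleep_paralysis" == s) = false := beq_eq_false_iff_ne.mpr (Ne.symm h9)
  have e10 : ("obe" == s) = false := beq_eq_false_iff_ne.mpr (Ne.symm h10)
  have e11 : ("nde" == s) = false := beq_eq_false_iff_ne.mpr (Ne.symm h11)
  have e12 : ("alien_encounter" == s) = false := beq_eq_false_iff_ne.mpr (Ne.symm h12)
  have e13 : ("possession" == s) = false := beq_eq_false_iff_ne.mpr (Ne.symm h13)
  have e14 : ("haunting" == s) = false := beq_eq_false_iff_ne.mpr (Ne.symm h14)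
  have e15 : ("ufo" == s) = false := beq_eq_false_iff_ne.mpr (Ne.symm h15)
  simp [get_frameworks_for_type_alt, REVERSE_INDEX, PySem.Dict.getD, PySem.Dict.get?,
        List.find?, e1,e2,e3,e4,e5,e6,e7,e8,e9,e10,e11,e12,e13,e14,e15,
        PySem.Dict.empty]

-- ===== VERDICT =====
set_option maxRecDepth 40000 in
theorem get_frameworks_for_type_spec : Claim_equal_get_frameworks_for_type := by
  intro s _
  unfold Spec_get_frameworks_for_type
  by_cases h : s ∈ pvTypes
  · simp only [pvTypes, List.mem_cons, List.not_mem_nil, or_false] at h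
    rcases h with rfl|rfl|rfl|rfl|rfl|rfl|rfl|rfl|rfl|rfl|rfl|rfl|rfl|rfl|rfl <;> decide
  · rw [pv_notin_A s h, pv_notin_B s h]
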